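-- pv_equiv track=rewrite | github.com/mohithpranav/contract-clause-RAG | app/api/document_analysis.py | generate_practical_impact_doc
-- ===== SOURCE A (Python) =====
-- from typing import Dict, List
--
-- def generate_practical_impact_doc(key_clauses: List[Dict]) -> str:
--     """Generate practical impact strictly from identified key clauses - no speculation"""
--
--     # Map clause categories to concrete impacts ONLY if that clause category exists
--     impact_parts = []
--
--     categories_found = {clause.get('category') for clause in key_clauses}
--
--     # Only add impacts for categories actually found in key clauses
--     if 'Termination' in categories_found:
--         # Check if termination clause actually mentions exit conditions
--         termination_clauses = [c for c in key_clauses if c.get('category') == 'Termination']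
--         if termination_clauses:
--             impact_parts.append("Contract termination conditions are defined in key clauses")
--
--     if 'Liability' in categories_found or 'Indemnification' in categories_found:
--         # Check if there's actual indemnification language
--         liability_clauses = [c for c in key_clauses if c.get('category') in ['Liability', 'Indemnification']]
--         if any('indemnif' in c.get('fullContent', '').lower() for c in liability_clauses):
--             impact_parts.append("Indemnification obligations are specified")
--         elif liability_clauses:
--             impact_parts.append("Liability terms and limitations are defined")
--
--     if 'Payment' in categories_found:
--         impact_parts.append("Payment obligations and terms are specified")
--
--     if 'Governing Law' in categories_found:
--         impact_parts.append("Jurisdiction and governing law are established")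
--
--     if 'Confidentiality' in categories_found:
--         impact_parts.append("Confidentiality restrictions apply to information sharing")
--
--     if 'Warranty' in categories_found:
--         impact_parts.append("Warranties or disclaimers are specified")
--
--     # If no specific categories, provide minimal grounded statement
--     if not impact_parts:
--         return "Key provisions are identified in the analyzed clauses above."
--
--     # Build concise impact statement from actual clauses only
--     return ". ".join(impact_parts[:3]) + "."
-- ===== SOURCE B (Python) =====
-- def generate_practical_impact_doc(key_clauses):
--     """Single pass over key_clauses maintaining category flags; no set, no rescans."""
--     term = liab = pay = law = conf = warr = has_indemnif = False
--     for c in key_clauses: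
--         cat = c.get('category')
--         if cat == 'Termination':
--             term = True
--         elif cat in ('Liability', 'Indemnification'):
--             liab = True
--             if 'indemnif' in c.get('fullContent', '').lower():
--                 has_indemnif = True
--         elif cat == 'Payment':
--             pay = True
--         elif cat == 'Governing Law':
--             law = True
--         elif cat == 'Confidentiality':
--             conf = True
--         elif cat == 'Warranty':
--             warr = True
--
--     impact_parts = []
--     if term:
--         impact_parts.append("Contract termination conditions are defined in key clauses")
--     if liab:
--         if has_indemnif:
--             impact_parts.append("Indemnification obligations are specified")
--         else:
--             impact_parts.append("Liability terms and limitations are defined")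
--     if pay:
--         impact_parts.append("Payment obligations and terms are specified")
--     if law:
--         impact_parts.append("Jurisdiction and governing law are established")
--     if conf:
--         impact_parts.append("Confidentiality restrictions apply to information sharing")
--     if warr:
--         impact_parts.append("Warranties or disclaimers are specified")
--
--     if not impact_parts:
--         return "Key provisions are identified in the analyzed clauses above."
--     return ". ".join(impact_parts[:3]) + "."
-- ===== Notes on version B (the rewrite author's own statement) =====
-- stated objective: simpler
-- what changed: Replaced A's set comprehension plus per-category rescans of key_clauses (two list-comprehension filters and a generator scan) by a single pass accumulating seven boolean flags, then the same ordered branch sequence reads only the flags.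
import Mathlib
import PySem

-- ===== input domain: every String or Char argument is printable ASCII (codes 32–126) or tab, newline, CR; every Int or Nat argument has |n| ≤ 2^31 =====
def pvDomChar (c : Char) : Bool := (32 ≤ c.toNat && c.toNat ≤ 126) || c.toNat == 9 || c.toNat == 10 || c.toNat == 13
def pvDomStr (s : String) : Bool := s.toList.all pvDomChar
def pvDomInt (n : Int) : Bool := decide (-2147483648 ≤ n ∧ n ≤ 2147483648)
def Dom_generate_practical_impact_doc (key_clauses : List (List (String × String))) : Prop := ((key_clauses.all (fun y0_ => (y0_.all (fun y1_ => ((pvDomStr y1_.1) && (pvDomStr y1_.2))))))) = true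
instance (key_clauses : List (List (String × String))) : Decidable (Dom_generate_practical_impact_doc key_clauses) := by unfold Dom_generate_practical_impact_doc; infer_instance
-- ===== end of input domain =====

-- B replaces A's category set plus per-category rescans of key_clauses by ONE pass
-- accumulating seven boolean flags; objective: simpler (and one traversal instead of several).

-- ===== PORT A =====
def generate_practical_impact_doc (key_clauses : List (List (String × String))) : String :=
  let impact_parts : List String := []
  let categories_found : PySem.Set (Option String) :=
    PySem.Set.ofList (key_clauses.map (fun clause => (PySem.Dict.mk clause).get? "category"))
  let impact_parts :=
    if categories_found.contains (some "Termination") then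
      let termination_clauses :=
        key_clauses.filter (fun c => (PySem.Dict.mk c).get? "category" == some "Termination")
      if !termination_clauses.isEmpty then
        impact_parts ++ ["Contract termination conditions are defined in key clauses"]
      else impact_parts
    else impact_parts
  let impact_parts :=
    if categories_found.contains (some "Liability") || categories_found.contains (some "Indemnification") then
      let liability_clauses :=
        key_clauses.filter (fun c =>
          (PySem.Dict.mk c).get? "category" == some "Liability" ||
          (PySem.Dict.mk c).get? "category" == some "Indemnification")
      if liability_clauses.any (fun c =>
          PySem.Str.isIn "indemnif" (PySem.Str.lower ((PySem.Dict.mk c).getD "fullContent" ""))) then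
        impact_parts ++ ["Indemnification obligations are specified"]
      else if !liability_clauses.isEmpty then
        impact_parts ++ ["Liability terms and limitations are defined"]
      else impact_parts
    else impact_parts
  let impact_parts :=
    if categories_found.contains (some "Payment") then
      impact_parts ++ ["Payment obligations and terms are specified"]
    else impact_parts
  let impact_parts :=
    if categories_found.contains (some "Governing Law") then
      impact_parts ++ ["Jurisdiction and governing law are established"]
    else impact_parts
  let impact_parts :=
    if categories_found.contains (some "Confidentiality") then
      impact_parts ++ ["Confidentiality restrictions apply to information sharing"]
    else impact_parts
  let impact_parts :=
    if categories_found.contains (some "Warranty") then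
      impact_parts ++ ["Warranties or disclaimers are specified"]
    else impact_parts
  if impact_parts.isEmpty then
    "Key provisions are identified in the analyzed clauses above."
  else
    PySem.Str.join ". " (PySem.List.slice impact_parts none (some 3)) ++ "."

-- ===== PORT B =====
-- one step of Source B's single for-loop over key_clauses (state: term, liab, has_indemnif, pay, law, conf, warr)
def pvAltStep (st : Bool × Bool × Bool × Bool × Bool × Bool × Bool)
    (c : List (String × String)) : Bool × Bool × Bool × Bool × Bool × Bool × Bool :=
  let (term, liab, hasInd, pay, law, conf, warr) := st
  let cat := (PySem.Dict.mk c).get? "category"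
  if cat == some "Termination" then (true, liab, hasInd, pay, law, conf, warr)
  else if cat == some "Liability" || cat == some "Indemnification" then
    if PySem.Str.isIn "indemnif" (PySem.Str.lower ((PySem.Dict.mk c).getD "fullContent" "")) then
      (term, true, true, pay, law, conf, warr)
    else (term, true, hasInd, pay, law, conf, warr)
  else if cat == some "Payment" then (term, liab, hasInd, true, law, conf, warr)
  else if cat == some "Governing Law" then (term, liab, hasInd, pay, true, conf, warr)
  else if cat == some "Confidentiality" then (term, liab, hasInd, pay, law, true, warr)
  else if cat == some "Warranty" then (term, liab, hasInd, pay, law, conf, true)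
  else (term, liab, hasInd, pay, law, conf, warr)

def generate_practical_impact_doc_alt (key_clauses : List (List (String × String))) : String :=
  let (term, liab, hasInd, pay, law, conf, warr) :=
    key_clauses.foldl pvAltStep (false, false, false, false, false, false, false)
  let impact_parts : List String :=
    (if term then ["Contract termination conditions are defined in key clauses"] else []) ++
    (if liab then
        (if hasInd then ["Indemnification obligations are specified"]
         else ["Liability terms and limitations are defined"])
      else []) ++
    (if pay then ["Payment obligations and terms are specified"] else []) ++
    (if law then ["Jurisdiction and governing law are established"] else []) ++
    (if conf then ["Confidentiality restrictions apply to information sharing"] else []) ++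
    (if warr then ["Warranties or disclaimers are specified"] else [])
  if impact_parts.isEmpty then
    "Key provisions are identified in the analyzed clauses above."
  else
    PySem.Str.join ". " (impact_parts.take 3) ++ "."

-- ===== PRECONDITION & SPEC =====
def Spec_generate_practical_impact_doc (key_clauses : List (List (String × String))) (out : String) : Prop := out = generate_practical_impact_doc_alt key_clauses
instance (key_clauses : List (List (String × String))) (out : String) : Decidable (Spec_generate_practical_impact_doc key_clauses out) := by unfold Spec_generate_practical_impact_doc; infer_instance

-- ===== CLAIM (what is proved, stated in full; the proofs are below) =====
def Claim_equal_generate_practical_impact_doc : Prop := ∀ (key_clauses : List (List (String × String))), Dom_generate_practical_impact_doc key_clauses → Spec_generate_practical_impact_doc key_clauses (generate_practical_impact_doc key_clauses)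

-- ===== LEMMAS AND PROOFS =====

-- the category predicates B's flags track
def pvCatIs (x : String) (c : List (String × String)) : Bool :=
  (PySem.Dict.mk c).get? "category" == some x

def pvIndem (c : List (String × String)) : Bool :=
  (pvCatIs "Liability" c || pvCatIs "Indemnification" c) &&
    PySem.Str.isIn "indemnif" (PySem.Str.lower ((PySem.Dict.mk c).getD "fullContent" ""))

-- fold port A's inline lambdas into the named predicates (definitional)
lemma pvCatIs_eta (x : String) :
    (fun c : List (String × String) => (PySem.Dict.mk c).get? "category" == some x) = pvCatIs x := rfl

lemma pvLiabLam_eta :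
    (fun c : List (String × String) =>
        (PySem.Dict.mk c).get? "category" == some "Liability" ||
        (PySem.Dict.mk c).get? "category" == some "Indemnification") =
      (fun c => pvCatIs "Liability" c || pvCatIs "Indemnification" c) := rfl

lemma pvIndem_eta :
    (fun c : List (String × String) =>
        (pvCatIs "Liability" c || pvCatIs "Indemnification" c) &&
        PySem.Str.isIn "indemnif" (PySem.Str.lower ((PySem.Dict.mk c).getD "fullContent" ""))) =
      pvIndem := rfl

lemma pvAltStep_eq (st : Bool × Bool × Bool × Bool × Bool × Bool × Bool)
    (c : List (String × String)) :
    pvAltStep st c =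
      (st.1 || pvCatIs "Termination" c,
       st.2.1 || (pvCatIs "Liability" c || pvCatIs "Indemnification" c),
       st.2.2.1 || pvIndem c,
       st.2.2.2.1 || pvCatIs "Payment" c,
       st.2.2.2.2.1 || pvCatIs "Governing Law" c,
       st.2.2.2.2.2.1 || pvCatIs "Confidentiality" c,
       st.2.2.2.2.2.2 || pvCatIs "Warranty" c) := by
  obtain ⟨t, li, hi, pa, la, co, wa⟩ := st
  simp only [pvAltStep, pvCatIs, pvIndem]
  generalize (PySem.Dict.mk c).get? "category" = cat
  generalize PySem.Str.isIn "indemnif" (PySem.Str.lower ((PySem.Dict.mk c).getD "fullContent" "")) = ind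
  by_cases h1 : cat = some "Termination" <;>
  by_cases h2 : cat = some "Liability" <;>
  by_cases h3 : cat = some "Indemnification" <;>
  by_cases h4 : cat = some "Payment" <;>
  by_cases h5 : cat = some "Governing Law" <;>
  by_cases h6 : cat = some "Confidentiality" <;>
  by_cases h7 : cat = some "Warranty" <;>
  cases ind <;>
  simp_all

lemma pvFoldl_flags (l : List (List (String × String)))
    (t li hi pa la co wa : Bool) :
    l.foldl pvAltStep (t, li, hi, pa, la, co, wa) =
      (t || l.any (pvCatIs "Termination"),
       li || l.any (fun c => pvCatIs "Liability" c || pvCatIs "Indemnification" c),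
       hi || l.any pvIndem,
       pa || l.any (pvCatIs "Payment"),
       la || l.any (pvCatIs "Governing Law"),
       co || l.any (pvCatIs "Confidentiality"),
       wa || l.any (pvCatIs "Warranty")) := by
  induction l generalizing t li hi pa la co wa with
  | nil => simp
  | cons c tl ih =>
    simp only [List.foldl_cons, pvAltStep_eq, ih, List.any_cons, Bool.or_assoc]

lemma pvAny_or {α : Type} (l : List α) (p q : α → Bool) :
    (l.any fun a => p a || q a) = (l.any p || l.any q) := by
  induction l with
  | nil => rfl
  | cons x tl ih => cases hp : p x <;> cases hq : q x <;> simp [List.any_cons, hp, hq, ih]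

lemma pvContains_ofList_map {α β : Type} [BEq β] [LawfulBEq β]
    (l : List α) (f : α → β) (x : β) :
    (PySem.Set.ofList (l.map f)).contains x = l.any (fun c => f c == x) := by
  rcases h : (PySem.Set.ofList (l.map f)).contains x with _ | _
  · rw [eq_comm, List.any_eq_false]
    intro c hc hfc
    rw [← Bool.not_eq_true, PySem.Set.contains_iff, PySem.Set.mem_ofList] at h
    exact h (List.mem_map.mpr ⟨c, hc, (beq_iff_eq.mp hfc).symm ▸ rfl⟩)
  · rw [PySem.Set.contains_iff, PySem.Set.mem_ofList, List.mem_map] at h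
    obtain ⟨c, hc, hfc⟩ := h
    rw [eq_comm, List.any_eq_true]
    exact ⟨c, hc, beq_iff_eq.mpr hfc⟩

lemma pvFilter_not_isEmpty {α : Type} (l : List α) (p : α → Bool)
    (h : l.any p = true) : (l.filter p).isEmpty = false := by
  rw [List.isEmpty_eq_false_iff]
  intro hnil
  rw [List.filter_eq_nil_iff] at hnil
  simp only [List.any_eq_true] at h
  obtain ⟨x, hx, hp⟩ := h
  exact absurd hp (by simpa using hnil x hx)

-- A's inner "termination_clauses is non-empty" test is forced once the outer any-test holds
lemma pvIf_filter {α : Type} (l : List α) (p : α → Bool) (X Y Z : List String) :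
    (if l.any p then (if !(l.filter p).isEmpty then X else Y) else Z) =
      (if l.any p then X else Z) := by
  cases h : l.any p
  · simp
  · simp [pvFilter_not_isEmpty _ _ h]

-- same for A's liability elif branch, with the indemnification test in the middle
lemma pvIf_filter2 {α : Type} (l : List α) (p : α → Bool) (c : Bool) (X Y Z W : List String) :
    (if l.any p then (if c then X else if !(l.filter p).isEmpty then Y else Z) else W) =
      (if l.any p then (if c then X else Y) else W) := by
  cases h : l.any p
  · simp
  · simp [pvFilter_not_isEmpty _ _ h]

-- ===== VERDICT (by name: the statement is the Claim_ definition above) =====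
theorem generate_practical_impact_doc_spec : Claim_equal_generate_practical_impact_doc := by
  intro kc _
  unfold Spec_generate_practical_impact_doc
  unfold generate_practical_impact_doc generate_practical_impact_doc_alt
  rw [pvFoldl_flags]
  simp only [pvContains_ofList_map, pvCatIs_eta, pvLiabLam_eta, List.any_filter, pvIndem_eta,
    Bool.false_or, List.nil_append]
  rw [← pvAny_or kc (pvCatIs "Liability") (pvCatIs "Indemnification")]
  rw [pvIf_filter, pvIf_filter2]
  generalize kc.any (pvCatIs "Termination") = bT
  generalize (kc.any fun c => pvCatIs "Liability" c || pvCatIs "Indemnification" c) = bL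
  generalize kc.any pvIndem = bI
  generalize kc.any (pvCatIs "Payment") = bP
  generalize kc.any (pvCatIs "Governing Law") = bG
  generalize kc.any (pvCatIs "Confidentiality") = bC
  generalize kc.any (pvCatIs "Warranty") = bW
  cases bT <;> cases bL <;> cases bI <;> cases bP <;> cases bG <;> cases bC <;> cases bW <;> rfl
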